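-- pv_equiv track=rewrite | github.com/jgfranco/formation | 2025_10/dominoFinalState.py | final_dominos_state
-- ===== SOURCE A (Python) =====
-- def final_dominos_state(dominosRow: list[str]):
--
--     def helper(start, end):
--
--         if dominosRow[start] == "R" and dominosRow[end] == "L":
--             while start < end:
--                 dominosRow[start] = "R"
--                 dominosRow[end] = "L"
--                 start +=1
--                 end -=1
--         elif dominosRow[start] == "R" and dominosRow[end] == "R":
--             while start < end:
--                 dominosRow[start] = "R"
--                 start +=1
--
--         elif dominosRow[start] == "L" and dominosRow[end] == "L":
--             while start < end:
--                 dominosRow[start] = "L"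
--                 start +=1
--
--     if len(dominosRow)<2: return dominosRow
--
--     dominosRow = ['L'] + dominosRow + ['R']
--
--     slow = 0
--     fast = 1
--
--     while fast < len(dominosRow):
--         while dominosRow[fast] == ".":
--             fast += 1
--
--         helper(slow, fast)
--
--         slow = fast
--         fast += 1
--
--     return dominosRow[1:len(dominosRow)-1]
-- ===== SOURCE B (Python) =====
-- def final_dominos_state(dominosRow: list[str]):
--     if len(dominosRow) < 2:
--         return dominosRow
--     left = []                      # nearest non-dot token to the left and its distance
--     tok, d = 'L', 1                # virtual wall left of the row
--     for c in dominosRow: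
--         if c != '.':
--             tok, d = c, 0
--         left.append((tok, d))
--         d += 1
--     right = []                     # nearest non-dot token to the right and its distance
--     tok, d = 'R', 1                # virtual wall right of the row
--     for c in reversed(dominosRow):
--         if c != '.':
--             tok, d = c, 0
--         right.append((tok, d))
--         d += 1
--     right.reverse()
--     res = []
--     for c, (lt, ld), (rt, rd) in zip(dominosRow, left, right):
--         if c != '.':
--             res.append(c)
--         elif lt == 'R' and rt == 'L':
--             res.append('R' if ld < rd else 'L' if rd < ld else '.')
--         elif lt == 'R' and rt == 'R':
--             res.append('R')
--         elif lt == 'L' and rt == 'L':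
--             res.append('L')
--         else:
--             res.append('.')
--     return res
-- ===== Notes on version B (the rewrite author's own statement) =====
-- stated objective: alternative
-- what changed: A pads the row with sentinels and rewrites each dot segment in place with two-pointer while-loops chosen by the segment's boundary pair; B never segments or mutates: two linear sweeps record, for every cell, the nearest non-dot token on each side with its distance, and each cell is then classified independently from those two (token, distance) pairs.
import Mathlib
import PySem

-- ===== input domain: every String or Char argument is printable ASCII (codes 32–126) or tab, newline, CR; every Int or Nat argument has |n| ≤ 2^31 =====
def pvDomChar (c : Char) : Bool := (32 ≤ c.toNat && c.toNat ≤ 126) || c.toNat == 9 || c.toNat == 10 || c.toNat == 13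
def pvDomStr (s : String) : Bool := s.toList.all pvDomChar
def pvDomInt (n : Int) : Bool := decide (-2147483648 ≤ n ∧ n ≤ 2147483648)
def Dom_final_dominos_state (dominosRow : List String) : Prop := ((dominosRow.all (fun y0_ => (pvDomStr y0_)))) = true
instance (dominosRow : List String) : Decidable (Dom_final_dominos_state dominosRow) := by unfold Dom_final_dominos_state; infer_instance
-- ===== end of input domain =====

-- B replaces A's sentinel-padded in-place two-pointer segment rewriting with two linear sweeps that
-- record, for every cell, the nearest non-dot token on each side with its distance; each cell is then
-- classified independently from those two (token, distance) pairs — no segmentation, no mutation;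
-- return values agree on every input.

-- ===== PORT A =====
-- A's while-loops, as structural recursion on a fuel argument that bounds the remaining
-- iterations (fuel is never exhausted at the call sites below, which pass the loop's own bound).
-- The read 'dominosRow[fast]' of the inner scan is modelled by getD with default "" (≠ "." so the
-- scan stops); exact here because the sentinel "R" always stops the scan inside the list.
def skipGoA (l : List String) : Nat → Nat → Nat
  | 0, fast => fast
  | fuel + 1, fast => if l.getD fast "" = "." then skipGoA l fuel (fast + 1) else fast
def skipDotsA (l : List String) (fast : Nat) : Nat := skipGoA l (l.length + 1) fast
def rlGoA : Nat → List String → Nat → Nat → List String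
  | 0, l, _, _ => l
  | fuel + 1, l, s, e => if s < e then rlGoA fuel ((l.set s "R").set e "L") (s + 1) (e - 1) else l
def rrGoA : Nat → List String → Nat → Nat → List String
  | 0, l, _, _ => l
  | fuel + 1, l, s, e => if s < e then rrGoA fuel (l.set s "R") (s + 1) e else l
def llGoA : Nat → List String → Nat → Nat → List String
  | 0, l, _, _ => l
  | fuel + 1, l, s, e => if s < e then llGoA fuel (l.set s "L") (s + 1) e else l
def helperA (l : List String) (s e : Nat) : List String :=
  if l.getD s "" = "R" ∧ l.getD e "" = "L" then rlGoA (e - s) l s e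
  else if l.getD s "" = "R" ∧ l.getD e "" = "R" then rrGoA (e - s) l s e
  else if l.getD s "" = "L" ∧ l.getD e "" = "L" then llGoA (e - s) l s e
  else l
def outGoA : Nat → List String → Nat → Nat → List String
  | 0, l, _, _ => l
  | fuel + 1, l, slow, fast =>
    if fast < l.length then
      outGoA fuel (helperA l slow (skipDotsA l fast)) (skipDotsA l fast) (skipDotsA l fast + 1)
    else l
def final_dominos_state (dominosRow : List String) : List String :=
  if dominosRow.length < 2 then dominosRow
  else
    let p := "L" :: dominosRow ++ ["R"]
    let q := outGoA p.length p 0 1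
    PySem.List.slice q (some 1) (some ((q.length : Int) - 1))

-- ===== PORT B =====
def final_dominos_state_alt (dominosRow : List String) : List String :=
  if dominosRow.length < 2 then dominosRow
  else
    let left := (dominosRow.foldl
      (fun (st : List (String × Int) × String × Int) c =>
        let tok := if c ≠ "." then c else st.2.1
        let d := if c ≠ "." then (0 : Int) else st.2.2
        (st.1 ++ [(tok, d)], tok, d + 1)) ([], "L", 1)).1
    let right := ((dominosRow.reverse.foldl
      (fun (st : List (String × Int) × String × Int) c =>
        let tok := if c ≠ "." then c else st.2.1
        let d := if c ≠ "." then (0 : Int) else st.2.2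
        (st.1 ++ [(tok, d)], tok, d + 1)) ([], "R", 1)).1).reverse
    List.zipWith3
      (fun c (l r : String × Int) =>
        if c ≠ "." then c
        else if l.1 = "R" ∧ r.1 = "L" then
          (if l.2 < r.2 then "R" else if r.2 < l.2 then "L" else ".")
        else if l.1 = "R" ∧ r.1 = "R" then "R"
        else if l.1 = "L" ∧ r.1 = "L" then "L"
        else ".")
      dominosRow left right

-- ===== PRECONDITION & SPEC =====
def Spec_final_dominos_state (dominosRow : List String) (out : List String) : Prop := out = final_dominos_state_alt dominosRow
instance (dominosRow : List String) (out : List String) : Decidable (Spec_final_dominos_state dominosRow out) := by unfold Spec_final_dominos_state; infer_instance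

-- ===== CLAIM (what is proved, stated in full; the proofs are below) =====
def Claim_equal_final_dominos_state : Prop := ∀ (dominosRow : List String), Dom_final_dominos_state dominosRow → Spec_final_dominos_state dominosRow (final_dominos_state dominosRow)

-- ===== LEMMAS AND PROOFS =====
-- canonical run-based specification both ports are reduced to
def fillB (a b : String) (k : Nat) : List String :=
  if a = "R" ∧ b = "L" then
    List.replicate (k / 2) "R" ++ List.replicate (k % 2) "." ++ List.replicate (k / 2) "L"
  else if a = "R" ∧ b = "R" then List.replicate k "R"
  else if a = "L" ∧ b = "L" then List.replicate k "L"
  else List.replicate k "."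
def procA (prev : String) (run : Nat) : List String → List String
  | [] => List.replicate run "."
  | x :: xs => if x = "." then procA prev (run + 1) xs
               else fillB prev x run ++ x :: procA x 0 xs
def procR (prev : String) (run : Nat) : List String → List String
  | [] => fillB prev "R" run
  | x :: xs => if x = "." then procR prev (run + 1) xs
               else fillB prev x run ++ x :: procR x 0 xs
def leadCount : List String → Nat
  | [] => 0
  | x :: xs => if x = "." then leadCount xs + 1 else 0
def dropDots : List String → List String
  | [] => []
  | x :: xs => if x = "." then dropDots xs else x :: xs
theorem getD_at_len (X Z : List String) (y : String) :
    (X ++ y :: Z).getD X.length "" = y := by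
  simp [List.getD_eq_getElem?_getD]
theorem getD_past_len (l : List String) (n : Nat) (h : l.length ≤ n) :
    l.getD n "" = "" := by
  simp [List.getD_eq_getElem?_getD, List.getElem?_eq_none h]
theorem set_at_len (X Z : List String) (y v : String) :
    (X ++ y :: Z).set X.length v = X ++ v :: Z := by
  induction X with
  | nil => rfl
  | cons x xs ih => simp [ih]
theorem decomp_dots (s : List String) :
    s = List.replicate (leadCount s) "." ++ dropDots s := by
  induction s with
  | nil => rfl
  | cons x xs ih =>
    by_cases hx : x = "."
    · subst hx
      simp [leadCount, dropDots, List.replicate_succ]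
      exact ih
    · simp [leadCount, dropDots, hx]
theorem dropDots_shape (s : List String) :
    dropDots s = [] ∨ ∃ b rest, dropDots s = b :: rest ∧ b ≠ "." := by
  induction s with
  | nil => exact Or.inl rfl
  | cons x xs ih =>
    by_cases hx : x = "."
    · simpa [dropDots, hx] using ih
    · exact Or.inr ⟨x, xs, by simp [dropDots, hx], hx⟩
theorem fillB_length (a b : String) (k : Nat) : (fillB a b k).length = k := by
  unfold fillB
  split
  · simp; omega
  split
  · simp
  split
  · simp
  · simp
theorem procR_length (prev : String) (run : Nat) (xs : List String) :
    (procR prev run xs).length = run + xs.length := by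
  induction xs generalizing prev run with
  | nil => simp [procR, fillB_length]
  | cons x xs ih =>
    by_cases hx : x = "."
    · simp [procR, hx, ih]; omega
    · simp [procR, hx, ih, fillB_length]
theorem procA_dots (prev : String) (run k : Nat) :
    procA prev run (List.replicate k ".") = List.replicate (run + k) "." := by
  induction k generalizing run with
  | zero => simp [procA]
  | succ k ih =>
    rw [List.replicate_succ]
    simp [procA, ih]
    omega
theorem procA_run (k : Nat) (prev : String) (run : Nat) (b : String) (rest : List String)
    (hb : b ≠ ".") :
    procA prev run (List.replicate k "." ++ b :: rest)
      = fillB prev b (run + k) ++ b :: procA b 0 rest := by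
  induction k generalizing run with
  | zero => simp [procA, hb]
  | succ k ih =>
    rw [List.replicate_succ]
    simp only [List.cons_append]
    simp [procA, ih]
    rw [show run + 1 + k = run + (k + 1) by omega]
theorem procA_sentinel (xs : List String) (prev : String) (run : Nat) :
    procA prev run (xs ++ ["R"]) = procR prev run xs ++ ["R"] := by
  induction xs generalizing prev run with
  | nil => simp [procA, procR]
  | cons x xs ih =>
    by_cases hx : x = "."
    · simp [procA, procR, hx, ih]
    · simp [procA, procR, hx, ih]
theorem skip_go_spec (fuel : Nat) :
    ∀ (k : Nat) (X rest : List String) (b : String), b ≠ "." → k < fuel →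
    skipGoA (X ++ (List.replicate k "." ++ b :: rest)) fuel X.length = X.length + k := by
  induction fuel with
  | zero => omega
  | succ fuel ih =>
    intro k X rest b hb hk
    match k with
    | 0 =>
      rw [skipGoA, List.replicate_zero, List.nil_append, getD_at_len]
      simp [hb]
    | k + 1 =>
      rw [skipGoA, List.replicate_succ, List.cons_append, getD_at_len, if_pos rfl]
      have h2 := ih k (X ++ ["."]) rest b hb (by omega)
      simp only [List.append_assoc, List.cons_append, List.nil_append,
        List.length_append, List.length_cons, List.length_nil] at h2 ⊢
      rw [h2]
      omega
theorem skip_go_end (fuel : Nat) :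
    ∀ (k : Nat) (X : List String), k < fuel →
    skipGoA (X ++ List.replicate k ".") fuel X.length = X.length + k := by
  induction fuel with
  | zero => omega
  | succ fuel ih =>
    intro k X hk
    match k with
    | 0 =>
      rw [skipGoA, getD_past_len _ _ (by simp)]
      simp
    | k + 1 =>
      rw [skipGoA, List.replicate_succ, getD_at_len, if_pos rfl]
      have h2 := ih k (X ++ ["."]) (by omega)
      simp only [List.append_assoc, List.cons_append, List.nil_append,
        List.length_append, List.length_cons, List.length_nil] at h2 ⊢
      rw [h2]
      omega
theorem rlGoA_stop (fuel : Nat) (l : List String) (s e : Nat) (h : ¬ s < e) :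
    rlGoA fuel l s e = l := by
  cases fuel <;> simp [rlGoA, h]
theorem outGoA_stop (fuel : Nat) (l : List String) (slow fast : Nat) (h : ¬ fast < l.length) :
    outGoA fuel l slow fast = l := by
  cases fuel <;> simp [outGoA, h]
theorem rr_spec (D : List String) :
    ∀ (fuel : Nat) (X rest : List String), D.length ≤ fuel →
    rrGoA fuel (X ++ (D ++ rest)) X.length (X.length + D.length)
      = X ++ (List.replicate D.length "R" ++ rest) := by
  induction D with
  | nil =>
    intro fuel X rest _
    cases fuel <;> simp [rrGoA]
  | cons d D ih =>
    intro fuel X rest hf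
    match fuel with
    | 0 => simp at hf
    | fuel + 1 =>
      rw [rrGoA, if_pos (by simp)]
      rw [List.cons_append, set_at_len]
      have h2 := ih fuel (X ++ ["R"]) rest (by simp only [List.length_cons] at hf; omega)
      simp only [List.append_assoc, List.cons_append, List.nil_append,
        List.length_append, List.length_cons, List.length_nil] at h2 ⊢
      rw [show X.length + (D.length + 1) = X.length + (0 + 1) + D.length by omega, h2]
      simp [List.replicate_succ]
theorem ll_spec (D : List String) :
    ∀ (fuel : Nat) (X rest : List String), D.length ≤ fuel →
    llGoA fuel (X ++ (D ++ rest)) X.length (X.length + D.length)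
      = X ++ (List.replicate D.length "L" ++ rest) := by
  induction D with
  | nil =>
    intro fuel X rest _
    cases fuel <;> simp [llGoA]
  | cons d D ih =>
    intro fuel X rest hf
    match fuel with
    | 0 => simp at hf
    | fuel + 1 =>
      rw [llGoA, if_pos (by simp)]
      rw [List.cons_append, set_at_len]
      have h2 := ih fuel (X ++ ["L"]) rest (by simp only [List.length_cons] at hf; omega)
      simp only [List.append_assoc, List.cons_append, List.nil_append,
        List.length_append, List.length_cons, List.length_nil] at h2 ⊢
      rw [show X.length + (D.length + 1) = X.length + (0 + 1) + D.length by omega, h2]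
      simp [List.replicate_succ]
theorem rl_spec (fuel : Nat) :
    ∀ (k : Nat) (X rest : List String) (a b : String), k < fuel →
    rlGoA fuel (X ++ a :: (List.replicate k "." ++ b :: rest)) X.length (X.length + 1 + k)
      = X ++ "R" :: (fillB "R" "L" k ++ "L" :: rest) := by
  induction fuel with
  | zero => omega
  | succ fuel ih =>
    intro k X rest a b hk
    match k with
    | 0 =>
      rw [rlGoA, if_pos (by omega)]
      rw [rlGoA_stop fuel _ _ _ (by omega)]
      simp [fillB]
    | 1 =>
      rw [rlGoA, if_pos (by omega)]
      rw [rlGoA_stop fuel _ _ _ (by omega)]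
      rw [show X.length + 1 + 1 = X.length + 2 by omega]
      simp [fillB, List.replicate]
    | k + 2 =>
      rw [rlGoA, if_pos (by omega)]
      have hrep : List.replicate (k + 2) "." = "." :: (List.replicate k "." ++ ["."]) := by
        rw [List.replicate_succ, ← List.replicate_succ']
      have hlist : ((X ++ a :: (List.replicate (k + 2) "." ++ b :: rest)).set X.length "R").set
            (X.length + 1 + (k + 2)) "L"
          = (X ++ ["R"]) ++ "." :: (List.replicate k "." ++ "." :: ("L" :: rest)) := by
        rw [hrep, show X.length + 1 + (k + 2) = X.length + (k + 3) by omega]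
        simp
      rw [hlist]
      have h2 := ih k (X ++ ["R"]) ("L" :: rest) "." "." (by omega)
      rw [show X.length + 1 + (k + 2) - 1 = (X ++ ["R"]).length + 1 + k by
            simp only [List.length_append, List.length_cons, List.length_nil]; omega,
          show X.length + 1 = (X ++ ["R"]).length by simp,
          h2]
      have hfill : fillB "R" "L" (k + 2) = "R" :: (fillB "R" "L" k ++ ["L"]) := by
        simp [fillB, show (k + 2) / 2 = k / 2 + 1 by omega, show (k + 2) % 2 = k % 2 by omega,
          List.replicate_succ]
        rw [← List.replicate_succ, List.replicate_succ']
      rw [hfill]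
      simp
theorem helper_spec (X rest : List String) (a b : String) (k : Nat) :
    helperA (X ++ a :: (List.replicate k "." ++ b :: rest)) X.length (X.length + 1 + k)
      = X ++ a :: (fillB a b k ++ b :: rest) := by
  have hga : (X ++ a :: (List.replicate k "." ++ b :: rest)).getD X.length "" = a :=
    getD_at_len X _ a
  have hgb : (X ++ a :: (List.replicate k "." ++ b :: rest)).getD (X.length + 1 + k) "" = b := by
    have h2 := getD_at_len (X ++ a :: List.replicate k ".") rest b
    simp only [List.append_assoc, List.cons_append, List.length_append, List.length_cons,
      List.length_replicate] at h2 ⊢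
    rw [show X.length + 1 + k = X.length + (k + 1) by omega, h2]
  unfold helperA
  rw [hga, hgb, show X.length + 1 + k - X.length = k + 1 by omega]
  by_cases hRL : a = "R" ∧ b = "L"
  · rw [if_pos hRL]
    obtain ⟨ha, hb⟩ := hRL
    subst ha; subst hb
    rw [rl_spec (k + 1) k X rest "R" "L" (by omega)]
  · rw [if_neg hRL]
    by_cases hRR : a = "R" ∧ b = "R"
    · rw [if_pos hRR]
      obtain ⟨ha, hb⟩ := hRR
      subst ha; subst hb
      have h2 := rr_spec ("R" :: List.replicate k ".") (k + 1) X ("R" :: rest) (by simp)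
      simp only [List.length_cons, List.length_replicate, List.cons_append] at h2
      rw [show X.length + 1 + k = X.length + (k + 1) by omega, h2, List.replicate_succ]
      simp [fillB]
    · rw [if_neg hRR]
      by_cases hLL : a = "L" ∧ b = "L"
      · rw [if_pos hLL]
        obtain ⟨ha, hb⟩ := hLL
        subst ha; subst hb
        have h2 := ll_spec ("L" :: List.replicate k ".") (k + 1) X ("L" :: rest) (by simp)
        simp only [List.length_cons, List.length_replicate, List.cons_append] at h2
        rw [show X.length + 1 + k = X.length + (k + 1) by omega, h2, List.replicate_succ]
        simp [fillB]
      · rw [if_neg hLL]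
        have hfill : fillB a b k = List.replicate k "." := by
          simp [fillB, hRL, hRR, hLL]
        rw [hfill]
theorem skipDots_spec (k : Nat) (X rest : List String) (b : String) (hb : b ≠ ".") :
    skipDotsA (X ++ (List.replicate k "." ++ b :: rest)) X.length = X.length + k := by
  unfold skipDotsA
  exact skip_go_spec _ k X rest b hb
    (by simp only [List.length_append, List.length_replicate, List.length_cons]; omega)
theorem skipDots_end (k : Nat) (X : List String) :
    skipDotsA (X ++ List.replicate k ".") X.length = X.length + k := by
  unfold skipDotsA
  exact skip_go_end _ k X
    (by simp only [List.length_append, List.length_replicate]; omega)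
theorem outer_spec (fuel : Nat) :
    ∀ (suffix X : List String) (a : String), suffix.length < fuel →
    outGoA fuel (X ++ a :: suffix) X.length (X.length + 1) = X ++ a :: procA a 0 suffix := by
  induction fuel with
  | zero => omega
  | succ fuel ih =>
    intro suffix X a hf
    rcases eq_or_ne suffix [] with hs | hs
    · subst hs
      rw [outGoA, if_neg (by simp)]
      simp [procA]
    · have hdec := decomp_dots suffix
      set k := leadCount suffix with hk
      rw [outGoA, if_pos (by
        simp only [List.length_append, List.length_cons]
        have : 0 < suffix.length := List.length_pos_iff.mpr hs
        omega)]
      rcases dropDots_shape suffix with hdd | ⟨b, rest, hdd, hb⟩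
      · -- trailing dots only: helper is a no-op and the loop exits
        rw [hdd, List.append_nil] at hdec
        have hskip : skipDotsA (X ++ a :: suffix) (X.length + 1) = X.length + 1 + k := by
          have h2 := skipDots_end k (X ++ [a])
          conv_lhs => rw [hdec]
          simp only [List.append_assoc, List.cons_append, List.nil_append,
            List.length_append, List.length_cons, List.length_nil] at h2 ⊢
          rw [show X.length + 1 + k = X.length + (0 + 1) + k by omega, ← h2]
        rw [hskip]
        have hlen : (X ++ a :: suffix).length = X.length + 1 + k := by
          conv_lhs => rw [hdec]
          simp
          omega
        have hg0 : (X ++ a :: suffix).getD (X.length + 1 + k) "" = "" :=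
          getD_past_len _ _ (le_of_eq hlen)
        have hhelp : helperA (X ++ a :: suffix) X.length (X.length + 1 + k)
            = X ++ a :: suffix := by
          unfold helperA
          rw [hg0]
          rw [if_neg (by intro hc; exact absurd hc.2 (by decide)),
            if_neg (by intro hc; exact absurd hc.2 (by decide)),
            if_neg (by intro hc; exact absurd hc.2 (by decide))]
        rw [hhelp]
        rw [outGoA_stop fuel _ _ _ (by omega)]
        rw [show procA a 0 suffix = List.replicate k "." from by
          conv_lhs => rw [hdec]
          rw [procA_dots, Nat.zero_add]]
        conv_lhs => rw [hdec]
      · -- next token b after k dots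
        rw [hdd] at hdec
        have hskip : skipDotsA (X ++ a :: suffix) (X.length + 1) = X.length + 1 + k := by
          have h2 := skipDots_spec k (X ++ [a]) rest b hb
          conv_lhs => rw [hdec]
          simp only [List.append_assoc, List.cons_append, List.nil_append,
            List.length_append, List.length_cons, List.length_nil] at h2 ⊢
          rw [show X.length + 1 + k = X.length + (0 + 1) + k by omega, ← h2]
        rw [hskip]
        have hhelp : helperA (X ++ a :: suffix) X.length (X.length + 1 + k)
            = X ++ a :: (fillB a b k ++ b :: rest) := by
          conv_lhs => rw [hdec]
          exact helper_spec X rest a b k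
        rw [hhelp]
        have hpre : X ++ a :: (fillB a b k ++ b :: rest)
            = (X ++ a :: fillB a b k) ++ b :: rest := by simp
        have hlenpre : (X ++ a :: fillB a b k).length = X.length + 1 + k := by
          simp [fillB_length]
          omega
        have hrlen : rest.length < fuel := by
          have : suffix.length = k + (rest.length + 1) := by
            conv_lhs => rw [hdec]
            simp
          omega
        rw [hpre]
        have h3 := ih rest (X ++ a :: fillB a b k) b hrlen
        rw [hlenpre] at h3
        rw [h3]
        rw [show procA a 0 suffix = fillB a b k ++ b :: procA b 0 rest from by
          conv_lhs => rw [hdec]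
          rw [procA_run k a 0 b rest hb, Nat.zero_add]]
        simp
theorem A_eq_procR (row : List String) (hlen : ¬ row.length < 2) :
    final_dominos_state row = procR "L" 0 row := by
  unfold final_dominos_state
  rw [if_neg hlen]
  have hA := outer_spec ("L" :: row ++ ["R"]).length (row ++ ["R"]) [] "L" (by simp)
  simp only [List.nil_append, List.length_nil, Nat.zero_add, List.cons_append] at hA
  show PySem.List.slice (outGoA ("L" :: row ++ ["R"]).length ("L" :: row ++ ["R"]) 0 1) (some 1)
      (some (((outGoA ("L" :: row ++ ["R"]).length ("L" :: row ++ ["R"]) 0 1).length : Int) - 1)) = _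
  rw [List.cons_append, hA, procA_sentinel]
  set M := procR "L" 0 row with hM
  have hMlen : M.length = row.length := by
    rw [hM, procR_length]
    exact Nat.zero_add _
  rw [show ("L" :: (M ++ ["R"])).length = M.length + 2 by simp]
  rw [show ((M.length + 2 : Nat) : Int) - 1 = ((M.length + 1 : Nat) : Int) by push_cast; ring]
  rw [show (1 : Int) = ((1 : Nat) : Int) from rfl]
  rw [PySem.List.slice_natCast]
  simp


-- ===== B-side lemmas: the two sweeps reduce to the same run-based spec =====
def decB (c : String) (l r : String × Int) : String :=
  if c ≠ "." then c
  else if l.1 = "R" ∧ r.1 = "L" then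
    (if l.2 < r.2 then "R" else if r.2 < l.2 then "L" else ".")
  else if l.1 = "R" ∧ r.1 = "R" then "R"
  else if l.1 = "L" ∧ r.1 = "L" then "L"
  else "."
def lS : String → Int → List String → List (String × Int)
  | _, _, [] => []
  | t, d, c :: cs =>
    if c ≠ "." then (c, 0) :: lS c 1 cs else (t, d) :: lS t (d + 1) cs
def lEndS : String → Int → List String → String × Int
  | t, d, [] => (t, d)
  | t, d, c :: cs => if c ≠ "." then lEndS c 1 cs else lEndS t (d + 1) cs
def rSv : String → Int → List String → List (String × Int) × String × Int
  | t, d, [] => ([], t, d)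
  | t, d, c :: cs =>
    let p := rSv t d cs
    if c ≠ "." then ((c, 0) :: p.1, c, 1) else ((p.2.1, p.2.2) :: p.1, p.2.1, p.2.2 + 1)

theorem foldSweep (cs : List String) : ∀ (acc : List (String × Int)) (t : String) (d : Int),
    (cs.foldl (fun (st : List (String × Int) × String × Int) c =>
        let tok := if c ≠ "." then c else st.2.1
        let d := if c ≠ "." then (0 : Int) else st.2.2
        (st.1 ++ [(tok, d)], tok, d + 1)) (acc, t, d))
      = (acc ++ lS t d cs, lEndS t d cs) := by
  induction cs with
  | nil => intro acc t d; simp [lS, lEndS]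
  | cons c cs ih =>
    intro acc t d
    by_cases hc : c = "."
    · subst hc
      simp only [List.foldl_cons]
      have h := ih (acc ++ [(t, d)]) t (d + 1)
      simp only [List.append_assoc, List.singleton_append] at h
      simpa [lS, lEndS] using h
    · simp only [List.foldl_cons]
      have h := ih (acc ++ [(c, 0)]) c 1
      simp only [List.append_assoc, List.singleton_append] at h
      simpa [lS, lEndS, hc] using h
theorem cons_map_range (t : String) (d : Int) (k : Nat) :
    (t, d) :: (List.range k).map (fun (j : Nat) => (t, (d + 1) + (j : Int)))
      = (List.range (k + 1)).map (fun (j : Nat) => (t, d + (j : Int))) := by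
  apply List.ext_getElem
  · simp
  · intro i h1 h2
    simp only [List.length_cons, List.length_map, List.length_range] at h1
    rcases i with _ | i
    · simp
    · simp only [List.getElem_cons_succ, List.getElem_map, List.getElem_range, Prod.mk.injEq]
      exact ⟨by trivial, by push_cast; ring⟩
theorem cons_map_range_rev (t : String) (b : Int) (k : Nat) :
    (t, b + (k : Int)) :: (List.range k).map (fun (j : Nat) => (t, b + ((k - 1 - j : Nat) : Int)))
      = (List.range (k + 1)).map (fun (j : Nat) => (t, b + ((k - j : Nat) : Int))) := by
  apply List.ext_getElem
  · simp
  · intro i h1 h2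
    simp only [List.length_cons, List.length_map, List.length_range] at h1
    rcases i with _ | i
    · simp
    · simp only [List.getElem_cons_succ, List.getElem_map, List.getElem_range, Prod.mk.injEq]
      exact ⟨by trivial, by congr 1; omega⟩
theorem lS_dots (k : Nat) : ∀ (t : String) (d : Int) (rest : List String),
    lS t d (List.replicate k "." ++ rest)
      = (List.range k).map (fun (j : Nat) => (t, d + (j : Int))) ++ lS t (d + k) rest := by
  induction k with
  | zero =>
    intro t d rest
    simp only [List.replicate_zero, List.nil_append, List.range_zero, List.map_nil,
      List.nil_append]
    norm_num
  | succ k ih =>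
    intro t d rest
    rw [List.replicate_succ, List.cons_append]
    show (if ("." : String) ≠ "." then _ else (t, d) :: lS t (d + 1) (List.replicate k "." ++ rest)) = _
    rw [if_neg (by simp)]
    rw [ih t (d + 1) rest, ← List.cons_append, cons_map_range]
    rw [show d + 1 + (k : Int) = d + ((k + 1 : Nat) : Int) by push_cast; ring]
theorem rSv_dots (k : Nat) : ∀ (a : String) (b : Int) (rest : List String),
    rSv a b (List.replicate k "." ++ rest)
      = ((List.range k).map (fun (j : Nat) => ((rSv a b rest).2.1,
            (rSv a b rest).2.2 + ((k - 1 - j : Nat) : Int))) ++ (rSv a b rest).1,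
          (rSv a b rest).2.1, (rSv a b rest).2.2 + k) := by
  induction k with
  | zero =>
    intro a b rest
    simp
  | succ k ih =>
    intro a b rest
    rw [List.replicate_succ, List.cons_append]
    show (let p := rSv a b (List.replicate k "." ++ rest);
        if ("." : String) ≠ "." then ((".", 0) :: p.1, ".", 1)
        else ((p.2.1, p.2.2) :: p.1, p.2.1, p.2.2 + 1)) = _
    rw [if_neg (by simp)]
    rw [ih a b rest]
    dsimp only
    simp only [Nat.add_sub_cancel]
    rw [← List.cons_append, cons_map_range_rev]
    refine congrArg₂ Prod.mk rfl (congrArg₂ Prod.mk rfl ?_)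
    push_cast; ring
theorem rSv_token (a : String) (b : Int) (t : String) (rest : List String) (ht : t ≠ ".") :
    rSv a b (t :: rest) = ((t, 0) :: (rSv a b rest).1, t, 1) := by
  show (let p := rSv a b rest;
      if t ≠ "." then ((t, 0) :: p.1, t, 1) else ((p.2.1, p.2.2) :: p.1, p.2.1, p.2.2 + 1)) = _
  rw [if_pos ht]
theorem lS_token (t : String) (d : Int) (c : String) (rest : List String) (hc : c ≠ ".") :
    lS t d (c :: rest) = (c, 0) :: lS c 1 rest := by
  show (if c ≠ "." then _ else _) = _
  rw [if_pos hc]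

theorem zipWith3_length {α β γ δ : Type} (f : α → β → γ → δ) (as : List α) (bs : List β)
    (cs : List γ) : (List.zipWith3 f as bs cs).length = min as.length (min bs.length cs.length) := by
  induction as generalizing bs cs with
  | nil => simp [List.zipWith3]
  | cons a as ih =>
    cases bs with
    | nil => simp [List.zipWith3]
    | cons b bs =>
      cases cs with
      | nil => simp [List.zipWith3]
      | cons c cs => simp only [List.zipWith3, List.length_cons, ih]; omega
theorem zipWith3_getElem {α β γ δ : Type} (f : α → β → γ → δ) :
    ∀ (as : List α) (bs : List β) (cs : List γ) (i : Nat)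
      (ha : i < as.length) (hb : i < bs.length) (hc : i < cs.length)
      (h : i < (List.zipWith3 f as bs cs).length),
    (List.zipWith3 f as bs cs)[i] = f as[i] bs[i] cs[i] := by
  intro as
  induction as with
  | nil => intro bs cs i ha; simp at ha
  | cons a as ih =>
    intro bs cs i ha hb hc h
    cases bs with
    | nil => simp at hb
    | cons b bs =>
      cases cs with
      | nil => simp at hc
      | cons c cs =>
        rcases i with _ | i
        · rfl
        · simp only [List.zipWith3, List.getElem_cons_succ]
          exact ih bs cs i (by simpa using ha) (by simpa using hb) (by simpa using hc)
            (by simpa [List.zipWith3] using h)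
theorem zipWith3_append {α β γ δ : Type} (f : α → β → γ → δ) : ∀ (as : List α) (bs : List β)
    (cs : List γ) (as' : List α) (bs' : List β) (cs' : List γ),
    as.length = bs.length → bs.length = cs.length →
    List.zipWith3 f (as ++ as') (bs ++ bs') (cs ++ cs')
      = List.zipWith3 f as bs cs ++ List.zipWith3 f as' bs' cs' := by
  intro as
  induction as with
  | nil =>
    intro bs cs as' bs' cs' h1 h2
    have hb : bs = [] := List.eq_nil_of_length_eq_zero (by simpa using h1.symm)
    subst hb
    have hc : cs = [] := List.eq_nil_of_length_eq_zero (by simpa using h2.symm)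
    subst hc
    simp [List.zipWith3]
  | cons a as ih =>
    intro bs cs as' bs' cs' h1 h2
    cases bs with
    | nil => simp at h1
    | cons b bs =>
      cases cs with
      | nil => simp at h2
      | cons c cs =>
        simp only [List.cons_append, List.zipWith3]
        rw [ih bs cs as' bs' cs' (by simpa using h1) (by simpa using h2)]

theorem fillB_zero (a b : String) : fillB a b 0 = [] := by
  unfold fillB; split_ifs <;> simp
theorem fillB_RL (k : Nat) : fillB "R" "L" k
    = List.replicate (k / 2) "R" ++ List.replicate (k % 2) "." ++ List.replicate (k / 2) "L" := by
  simp [fillB]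
theorem fillB_RL_getElem (k i : Nat) (h2 : i < (fillB "R" "L" k).length) :
    (fillB "R" "L" k)[i] = if 2 * i + 1 < k then "R" else if 2 * i + 1 = k then "." else "L" := by
  simp only [fillB_RL] at h2 ⊢
  simp only [List.getElem_append, List.length_append, List.length_replicate,
    List.getElem_replicate]
  split_ifs <;> first | rfl | (exfalso; omega)
theorem procR_dots (prev : String) (run k : Nat) :
    procR prev run (List.replicate k ".") = fillB prev "R" (run + k) := by
  induction k generalizing run with
  | zero => simp [procR]
  | succ k ih =>
    rw [List.replicate_succ]
    simp [procR, ih]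
    rw [show run + 1 + k = run + (k + 1) by omega]
theorem procR_run (k : Nat) (prev : String) (run : Nat) (b : String) (rest : List String)
    (hb : b ≠ ".") :
    procR prev run (List.replicate k "." ++ b :: rest)
      = fillB prev b (run + k) ++ b :: procR b 0 rest := by
  induction k generalizing run with
  | zero => simp [procR, hb]
  | succ k ih =>
    rw [List.replicate_succ]
    simp only [List.cons_append]
    simp [procR, ih]
    rw [show run + 1 + k = run + (k + 1) by omega]

theorem fillB_getElem (prev t : String) (k i : Nat) (h2 : i < (fillB prev t k).length) :
    (fillB prev t k)[i]
      = decB "." (prev, 1 + (i : Int)) (t, 1 + ((k - 1 - i : Nat) : Int)) := by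
  have hik : i < k := by rwa [fillB_length] at h2
  by_cases hRL : prev = "R" ∧ t = "L"
  · obtain ⟨h1, h3⟩ := hRL
    subst h1; subst h3
    rw [fillB_RL_getElem k i h2]
    simp only [decB]
    norm_num
    split_ifs <;> first | rfl | (exfalso; omega)
  · by_cases hRR : prev = "R" ∧ t = "R"
    · obtain ⟨h1, h3⟩ := hRR
      subst h1; subst h3
      simp only [show fillB "R" "R" k = List.replicate k "R" from by simp [fillB],
        List.getElem_replicate]
      simp [decB]
    · by_cases hLL : prev = "L" ∧ t = "L"
      · obtain ⟨h1, h3⟩ := hLL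
        subst h1; subst h3
        simp only [show fillB "L" "L" k = List.replicate k "L" from by simp [fillB],
          List.getElem_replicate]
        simp [decB]
      · simp only [show fillB prev t k = List.replicate k "." from by
            simp [fillB, hRL, hRR, hLL],
          List.getElem_replicate]
        simp [decB, hRL, hRR, hLL]

theorem seg3 (prev t : String) (k : Nat) :
    List.zipWith3 decB (List.replicate k ".")
        ((List.range k).map (fun (j : Nat) => (prev, 1 + (j : Int))))
        ((List.range k).map (fun (j : Nat) => (t, 1 + ((k - 1 - j : Nat) : Int))))
      = fillB prev t k := by
  apply List.ext_getElem
  · simp [zipWith3_length, fillB_length]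
  · intro i h1 h2
    have hik : i < k := by
      rw [zipWith3_length] at h1
      simpa using h1
    rw [zipWith3_getElem decB _ _ _ i (by simpa using hik) (by simpa using hik)
      (by simpa using hik) h1]
    simp only [List.getElem_replicate, List.getElem_map, List.getElem_range]
    rw [fillB_getElem prev t k i h2]
theorem mainB3 (fuel : Nat) : ∀ (s : List String) (prev : String), s.length ≤ fuel →
    prev ≠ "." →
    List.zipWith3 decB s (lS prev 1 s) ((rSv "R" 1 s).1) = procR prev 0 s := by
  induction fuel with
  | zero =>
    intro s prev hsf _
    have hs : s = [] := List.eq_nil_of_length_eq_zero (Nat.le_zero.mp hsf)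
    subst hs
    simp [List.zipWith3, procR, fillB_zero]
  | succ fuel ih =>
    intro s prev hsf hprev
    have hdec := decomp_dots s
    set K := leadCount s with hK
    rcases dropDots_shape s with hdd | ⟨t, rest, hdd, ht⟩
    · -- s is all dots: virtual "R" wall on the right
      rw [hdd, List.append_nil] at hdec
      rw [hdec]
      have hl := lS_dots K prev 1 []
      rw [List.append_nil] at hl
      rw [show lS prev (1 + (K : Int)) [] = [] from rfl, List.append_nil] at hl
      have hr := rSv_dots K "R" 1 []
      rw [List.append_nil] at hr
      rw [hl]
      rw [show (rSv "R" 1 (List.replicate K ".")).1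
          = (List.range K).map (fun (j : Nat) => ("R", 1 + ((K - 1 - j : Nat) : Int))) from by
        rw [hr]; simp [rSv]]
      rw [seg3 prev "R" K]
      rw [procR_dots, Nat.zero_add]
    · -- a dot run, then token t, then the rest
      rw [hdd] at hdec
      have hslen : s.length = K + 1 + rest.length := by rw [hdec]; simp; omega
      rw [hdec]
      have hl := lS_dots K prev 1 (t :: rest)
      rw [lS_token prev (1 + (K : Int)) t rest ht] at hl
      have hr := rSv_dots K "R" 1 (t :: rest)
      rw [rSv_token "R" 1 t rest ht] at hr
      rw [hl]
      rw [show (rSv "R" 1 (List.replicate K "." ++ t :: rest)).1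
          = (List.range K).map (fun (j : Nat) => (t, 1 + ((K - 1 - j : Nat) : Int)))
              ++ (t, 0) :: (rSv "R" 1 rest).1 from by rw [hr]]
      rw [zipWith3_append decB (List.replicate K ".") _ _ _ _ _ (by simp) (by simp)]
      rw [show List.zipWith3 decB (t :: rest) ((t, 0) :: lS t 1 rest)
            ((t, 0) :: (rSv "R" 1 rest).1)
          = t :: List.zipWith3 decB rest (lS t 1 rest) ((rSv "R" 1 rest).1) from by
        simp only [List.zipWith3]
        rw [show decB t (t, 0) (t, 0) = t from by simp [decB, ht]]]
      rw [ih rest t (by omega) ht]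
      rw [seg3 prev t K]
      rw [procR_run K prev 0 t rest ht, Nat.zero_add]
theorem lS_append (xs : List String) : ∀ (ys : List String) (t : String) (d : Int),
    lS t d (xs ++ ys) = lS t d xs ++ lS (lEndS t d xs).1 (lEndS t d xs).2 ys := by
  induction xs with
  | nil => intro ys t d; simp [lS, lEndS]
  | cons c cs ih =>
    intro ys t d
    by_cases hc : c = "."
    · subst hc; simp [lS, lEndS, ih]
    · simp [lS, lEndS, hc, ih]
theorem lEndS_append (xs : List String) : ∀ (ys : List String) (t : String) (d : Int),
    lEndS t d (xs ++ ys) = lEndS (lEndS t d xs).1 (lEndS t d xs).2 ys := by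
  induction xs with
  | nil => intro ys t d; simp [lEndS]
  | cons c cs ih =>
    intro ys t d
    by_cases hc : c = "."
    · subst hc; simp [lEndS, ih]
    · simp [lEndS, hc, ih]
theorem sweep_reverse (cs : List String) : ∀ (t : String) (d : Int),
    (lS t d cs.reverse).reverse = (rSv t d cs).1 ∧ lEndS t d cs.reverse = (rSv t d cs).2 := by
  induction cs with
  | nil => intro t d; simp [lS, lEndS, rSv]
  | cons c cs ih =>
    intro t d
    obtain ⟨ih1, ih2⟩ := ih t d
    rw [List.reverse_cons, lS_append, lEndS_append, ih2]
    by_cases hc : c = "."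
    · subst hc
      constructor
      · simp only [lS, rSv]
        simp [ih1]
      · simp only [lEndS, rSv]
        simp
    · constructor
      · simp only [lS, rSv]
        simp [hc, ih1]
      · simp only [lEndS, rSv]
        simp [hc]
theorem B_eq_procR (row : List String) (hlen : ¬ row.length < 2) :
    final_dominos_state_alt row = procR "L" 0 row := by
  unfold final_dominos_state_alt
  rw [if_neg hlen]
  simp only [foldSweep, List.nil_append]
  rw [show (lS "R" 1 row.reverse).reverse = (rSv "R" 1 row).1 from (sweep_reverse row "R" 1).1]
  exact mainB3 row.length row "L" le_rfl (by decide)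

-- ===== VERDICT (by name: the statement is the Claim_ definition above) =====
theorem final_dominos_state_spec : Claim_equal_final_dominos_state := by
  intro dominosRow _
  unfold Spec_final_dominos_state
  by_cases hlen : dominosRow.length < 2
  · unfold final_dominos_state final_dominos_state_alt
    rw [if_pos hlen, if_pos hlen]
  · rw [A_eq_procR dominosRow hlen, B_eq_procR dominosRow hlen]
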